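-- pv_equiv track=rewrite | github.com/allanRoberto/revesbot-final | apps/signals/patterns/analise.py | analyze_zero_behavior
-- ===== SOURCE A (Python) =====
-- from typing import List, Dict, Set, Tuple, Optional
-- from collections import Counter
--
-- def analyze_zero_behavior(numbers: List[int]) -> List[int]:
--     """
--     Camada 5: Comportamento do zero.
--     Réplica exata do JS.
--     """
--     after_zero = []
--
--     for idx, num in enumerate(numbers):
--         # JS: if (num === 0 && idx > 0)
--         if num == 0 and idx > 0:
--             # JS: numbers.slice(idx + 1, idx + 4) - pega 3 números DEPOIS do zero na lista
--             before = numbers[idx + 1:idx + 4]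
--             after_zero.extend(before)
--
--     # Contar frequência
--     counts = Counter(after_zero)
--     sorted_items = sorted(counts.items(), key=lambda x: (-x[1], x[0]))
--     return [num for num, _ in sorted_items[:5]]
-- ===== SOURCE B (Python) =====
-- def analyze_zero_behavior(numbers):
--     """Single backward-window pass: each position j is credited once with the
--     number of zeros among the three preceding positions (at index > 0), so the
--     Counter is built without materialising the after_zero list."""
--     counts = {}
--     n = len(numbers)
--     for j in range(n):
--         w = sum(1 for p in (j - 1, j - 2, j - 3) if 0 < p and numbers[p] == 0)
--         if w != 0:
--             counts[numbers[j]] = counts.get(numbers[j], 0) + w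
--     top = sorted(counts, key=lambda v: (-counts[v], v))
--     return top[:5]
-- ===== Notes on version B (the rewrite author's own statement) =====
-- stated objective: alternative
-- what changed: B never materialises the after_zero list: a single pass credits each position with the number of zeros among its three preceding indices (index > 0) directly into a dict, then sorts the distinct values by (-count, value) and takes the first five.
import Mathlib
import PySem

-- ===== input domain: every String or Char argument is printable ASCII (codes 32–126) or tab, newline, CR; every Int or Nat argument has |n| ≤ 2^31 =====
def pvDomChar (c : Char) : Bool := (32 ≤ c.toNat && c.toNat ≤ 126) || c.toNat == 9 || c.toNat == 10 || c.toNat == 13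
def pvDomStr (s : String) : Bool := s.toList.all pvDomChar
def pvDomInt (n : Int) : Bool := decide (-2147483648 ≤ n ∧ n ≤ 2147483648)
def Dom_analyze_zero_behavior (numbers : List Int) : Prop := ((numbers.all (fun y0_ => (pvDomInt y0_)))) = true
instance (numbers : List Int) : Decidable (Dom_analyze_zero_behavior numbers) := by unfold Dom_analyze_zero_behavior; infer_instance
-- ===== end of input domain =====

-- B replaces A's materialised after_zero list by a single backward-window pass that adds,
-- for each position, the number of preceding zeros among the three previous indices (> 0)
-- directly into a dict, then sorts the distinct values by (-count, value); same result,
-- no intermediate list (objective: alternative decomposition, similar cost).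

-- ===== PORT A =====
def analyze_zero_behavior (numbers : List Int) : List Int :=
  let after_zero : List Int := (PySem.List.enumerate numbers).foldl
    (fun acc p =>
      if p.2 == 0 && decide (0 < p.1) then
        acc ++ PySem.List.slice numbers (some (p.1 + 1)) (some (p.1 + 4))
      else acc) []
  let counts := PySem.Dict.counter after_zero
  let sorted_items := PySem.List.sorted2 counts.items (fun x => -x.2) (fun x => x.1)
  (PySem.List.slice sorted_items none (some 5)).map (fun p => p.1)

-- ===== PORT B =====
def analyze_zero_behavior_alt (numbers : List Int) : List Int :=
  let n : Int := PySem.List.len numbers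
  let counts : PySem.Dict Int Int := (PySem.List.pyRange 0 n).foldl
    (fun d j =>
      let w : Int := (([j - 1, j - 2, j - 3].countP
        (fun p => decide (0 < p) && (PySem.List.pyGetD numbers p 1 == 0)) : Nat) : Int)
      if w ≠ 0 then d.modify (PySem.List.pyGetD numbers j 0) 0 (· + w) else d)
    PySem.Dict.empty
  let top := PySem.List.sorted2 counts.keys (fun v => -(counts.getD v 0)) (fun v => v)
  PySem.List.slice top none (some 5)

-- ===== PRECONDITION & SPEC =====
def Spec_analyze_zero_behavior (numbers : List Int) (out : List Int) : Prop := out = analyze_zero_behavior_alt numbers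
instance (numbers : List Int) (out : List Int) : Decidable (Spec_analyze_zero_behavior numbers out) := by unfold Spec_analyze_zero_behavior; infer_instance

-- ===== CLAIM (what is proved, stated in full; the proofs are below) =====
def Claim_equal_analyze_zero_behavior : Prop := ∀ (numbers : List Int), Dom_analyze_zero_behavior numbers → Spec_analyze_zero_behavior numbers (analyze_zero_behavior numbers)

-- ===== LEMMAS AND PROOFS =====

-- insertBy only inspects `before x y` for y already in ys
theorem insertBy_congr {α : Type} (before before' : α → α → Bool) (x : α) (ys : List α)
    (h : ∀ y ∈ ys, before x y = before' x y) :
    PySem.List.insertBy before x ys = PySem.List.insertBy before' x ys := by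
  induction ys with
  | nil => rfl
  | cons y ys ih =>
    simp only [PySem.List.insertBy, h y (by simp)]
    split
    · rfl
    · simp only [List.cons.injEq, true_and]
      exact ih (fun z hz => h z (by simp [hz]))

theorem foldl_insertBy_congr {α : Type} (before before' : α → α → Bool) :
    ∀ (l acc : List α),
    (∀ a b, (a ∈ l ∨ a ∈ acc) → (b ∈ l ∨ b ∈ acc) → before a b = before' a b) →
    l.foldl (fun acc x => PySem.List.insertBy before x acc) acc
      = l.foldl (fun acc x => PySem.List.insertBy before' x acc) acc := by
  intro l
  induction l with
  | nil => intro acc h; rfl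
  | cons x l ih =>
    intro acc h
    simp only [List.foldl_cons]
    rw [insertBy_congr before before' x acc
      (fun y hy => h x y (Or.inl (by simp)) (Or.inr hy))]
    refine ih _ (fun a b ha hb => ?_)
    have key : ∀ c, c ∈ l ∨ c ∈ PySem.List.insertBy before' x acc → c ∈ x :: l ∨ c ∈ acc := by
      intro c hc
      rcases hc with h1 | h1
      · exact Or.inl (List.mem_cons_of_mem _ h1)
      · rcases (PySem.List.insertBy_mem_iff _ _ _ _).1 h1 with rfl | h2
        · exact Or.inl (List.mem_cons_self ..)
        · exact Or.inr h2
    exact h a b (key a ha) (key b hb)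

-- Python's (-count, value) lexicographic comparison as a single Int key, for |value| ≤ 2^31
theorem lex_bool_eq (c d x y : Int) (hx : -2147483648 ≤ x ∧ x ≤ 2147483648)
    (hy : -2147483648 ≤ y ∧ y ≤ 2147483648) :
    (decide (c < d) || (!decide (d < c) && decide (x < y)))
      = decide (c * 17179869184 + x < d * 17179869184 + y) := by
  rcases lt_trichotomy c d with h | h | h
  · simp only [decide_eq_true h, Bool.true_or]
    symm; rw [decide_eq_true_eq]; omega
  · subst h; simp only [lt_irrefl, decide_false, Bool.false_or, Bool.not_false, Bool.true_and]
    congr 1; rw [eq_iff_iff]; omega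
  · simp only [decide_eq_true h, Bool.not_true, Bool.false_and, Bool.or_false]
    rw [decide_eq_false (by omega), decide_eq_false (by omega)]

theorem sorted2_eq_sorted {α : Type} (xs : List α) (k1 k2 : α → Int)
    (hb : ∀ a ∈ xs, -2147483648 ≤ k2 a ∧ k2 a ≤ 2147483648) :
    PySem.List.sorted2 xs k1 k2
      = PySem.List.sorted xs (fun a => k1 a * 17179869184 + k2 a) := by
  simp only [PySem.List.sorted2, PySem.List.sorted, if_neg (by decide : ¬(false = true))]
  apply foldl_insertBy_congr
  intro a b ha hb2
  simp only [List.mem_nil_iff, or_false] at ha hb2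
  exact lex_bool_eq (k1 a) (k1 b) (k2 a) (k2 b) (hb a ha) (hb b hb2)

theorem count_take3 (xs : List Int) (v : Int) :
    ((xs.take 3).count v : Int)
      = (if xs[0]? = some v then 1 else 0) + (if xs[1]? = some v then 1 else 0)
        + (if xs[2]? = some v then 1 else 0) := by
  match xs with
  | [] => simp
  | [a] => simp [List.count_cons]
  | [a,b] => simp [List.count_cons]; split_ifs <;> simp_all
  | a::b::c::t => simp [List.count_cons]; split_ifs <;> simp_all

theorem sum_range_extend (f : ℕ → ℤ) (n m : ℕ) (hnm : n ≤ m)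
    (hf : ∀ k, n ≤ k → f k = 0) :
    ∑ k ∈ Finset.range m, f k = ∑ k ∈ Finset.range n, f k := by
  symm
  apply Finset.sum_subset
    (by intro x hx; simp only [Finset.mem_range] at hx ⊢; omega : Finset.range n ⊆ Finset.range m)
  intro x hx hnx
  exact hf x (by simp at hx hnx; omega)

theorem sum_range_shift (f : ℕ → ℤ) (n i : ℕ)
    (hf : ∀ k, n ≤ k + i → f k = 0) :
    ∑ k ∈ Finset.range n, f k
      = ∑ j ∈ Finset.range n, (if i ≤ j then f (j - i) else 0) := by
  have h1 : ∑ j ∈ Finset.range (i + n), (if i ≤ j then f (j - i) else 0)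
      = ∑ j ∈ Finset.range n, (if i ≤ j then f (j - i) else 0) := by
    apply sum_range_extend _ n (i + n) (by omega)
    intro k hk
    split_ifs with hik
    · exact hf _ (by omega)
    · rfl
  rw [← h1, Finset.sum_range_add]
  have h2 : ∀ j ∈ Finset.range i, (if i ≤ j then f (j - i) else 0) = 0 := by
    intro j hj; rw [if_neg (by simp at hj; omega)]
  rw [Finset.sum_congr rfl h2]
  simp only [Finset.sum_const_zero, zero_add]
  apply Finset.sum_congr rfl
  intro k _
  rw [if_pos (by omega)]
  congr 1
  omega

theorem count_flatMap {α : Type} (g : α → List Int) (v : Int) :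
    ∀ (xs : List α),
    ((xs.flatMap g).count v : Int) = (xs.map (fun x => ((g x).count v : Int))).sum := by
  intro xs; induction xs with
  | nil => simp
  | cons x xs ih => simp [List.count_append, ih]

theorem sum_map_filter {α : Type} (p : α → Bool) (f : α → ℤ) :
    ∀ (l : List α), ((l.filter p).map f).sum = (l.map (fun x => if p x then f x else 0)).sum := by
  intro l; induction l with
  | nil => rfl
  | cons x l ih => by_cases h : p x <;> simp [h, ih]

theorem getD_foldl_modify_addw {β : Type} (key : β → Int) (w : β → Int) :
    ∀ (l : List β) (d : PySem.Dict Int Int) (v : Int),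
    (l.foldl (fun d x => if w x ≠ 0 then d.modify (key x) 0 (· + w x) else d) d).getD v 0
      = d.getD v 0 + (l.map (fun x => if key x = v then w x else 0)).sum := by
  intro l
  induction l with
  | nil => simp
  | cons x l ih =>
    intro d v
    simp only [List.foldl_cons, List.map_cons, List.sum_cons]
    by_cases hw : w x = 0
    · rw [if_neg (by simp [hw]), ih]
      rw [show (if key x = v then w x else 0) = 0 by split <;> simp [hw]]
      ring
    · rw [if_pos hw, ih, PySem.Dict.getD_modify]
      by_cases h : v = key x
      · rw [if_pos h, if_pos h.symm, h]; ring
      · rw [if_neg h, if_neg (fun hh => h hh.symm)]; ring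

theorem filter_flatMap_congr {α : Type} (p q : α → Bool) (f g : α → List Int) (L : List α)
    (h1 : ∀ k ∈ L, p k = q k) (h2 : ∀ k ∈ L, f k = g k) :
    (L.filter p).flatMap f = (L.filter q).flatMap g := by
  rw [List.filter_congr h1]
  exact List.flatMap_congr (fun x hx => h2 x (List.mem_of_mem_filter hx))

-- A's after_zero list (exactly the port's fold)
def pvAz (l : List Int) : List Int :=
  (PySem.List.enumerate l).foldl
    (fun acc p =>
      if p.2 == 0 && decide (0 < p.1) then
        acc ++ PySem.List.slice l (some (p.1 + 1)) (some (p.1 + 4))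
      else acc) []

-- B's dict (exactly the port's fold)
def pvB (l : List Int) : PySem.Dict Int Int :=
  (PySem.List.pyRange 0 (PySem.List.len l)).foldl
    (fun d j =>
      let w : Int := (([j - 1, j - 2, j - 3].countP
        (fun p => decide (0 < p) && (PySem.List.pyGetD l p 1 == 0)) : Nat) : Int)
      if w ≠ 0 then d.modify (PySem.List.pyGetD l j 0) 0 (· + w) else d)
    PySem.Dict.empty

-- the shared canonical double count: pvT l v i k = 1 iff position k holds a zero (k ≥ 1)
-- and position k+i holds v
def pvT (l : List Int) (v : Int) (i k : Nat) : Int :=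
  if 1 ≤ k ∧ l[k]? = some 0 ∧ l[k+i]? = some v then 1 else 0

def pvS (l : List Int) (v : Int) : Int :=
  ∑ k ∈ Finset.range l.length, (pvT l v 1 k + pvT l v 2 k + pvT l v 3 k)

theorem pvAz_eq (l : List Int) :
    pvAz l = ((List.range l.length).filter
        (fun k => decide (1 ≤ k) && decide (l[k]? = some (0:Int)))).flatMap
      (fun k => (l.drop (k+1)).take 3) := by
  unfold pvAz
  rw [PySem.List.foldl_if_eq_foldl_filter, PySem.List.foldl_append_eq_flatMap]
  rw [List.nil_append]
  rw [PySem.List.enumerate_eq_map_pyRange l 1]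
  rw [show PySem.List.len l = ((l.length : Nat) : Int) from rfl]
  rw [PySem.List.pyRange_zero_natCast]
  rw [List.map_map, List.filter_map, List.flatMap_map]
  simp only [Function.comp_def]
  apply filter_flatMap_congr
  · intro k _
    show (PySem.List.pyGetD l (k : Int) 1 == 0 && decide ((0:Int) < (k : Int))) = _
    rw [PySem.List.pyGetD_natCast, List.getD_eq_getElem?_getD]
    rcases h : l[k]? with _ | a
    · simp
    · simp only [Option.getD_some]
      have h2 : (decide ((0:Int) < (k:Int))) = decide (1 ≤ k) := by
        rw [decide_eq_decide]; omega
      rw [h2, Bool.and_comm]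
      congr 1
      simp only [Option.some_inj]
      rw [Bool.eq_iff_iff]
      simp
  · intro k _
    show PySem.List.slice l (some ((k:Int) + 1)) (some ((k:Int) + 4)) = _
    have e1 : ((k:Int) + 1) = (((k+1 : Nat)) : Int) := by push_cast; ring
    have e2 : ((k:Int) + 4) = (((k+1 : Nat)) : Int) + ((3:Nat) : Int) := by push_cast; ring
    rw [e1, e2, PySem.List.slice_natCast_add]

theorem azCount (l : List Int) (v : Int) : ((pvAz l).count v : ℤ) = pvS l v := by
  rw [pvAz_eq, count_flatMap, sum_map_filter]
  have bridge : ∀ F : ℕ → ℤ, ((List.range l.length).map F).sum = ∑ k ∈ Finset.range l.length, F k :=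
    fun F => rfl
  rw [bridge]
  unfold pvS
  apply Finset.sum_congr rfl
  intro k _
  rw [count_take3]
  simp only [List.getElem?_drop]
  by_cases h1 : 1 ≤ k ∧ l[k]? = some (0:Int)
  · rw [if_pos (by simp [h1.1, h1.2])]
    have e0 : k + 1 + 0 = k + 1 := rfl
    have e1 : k + 1 + 1 = k + 2 := rfl
    have e2 : k + 1 + 2 = k + 3 := rfl
    simp only [e0, e1, e2, pvT, h1.1, h1.2, true_and]
  · rw [if_neg (by simpa using fun ha hb => h1 ⟨ha, hb⟩)]
    simp only [pvT]
    rw [if_neg (fun hc => h1 ⟨hc.1, hc.2.1⟩), if_neg (fun hc => h1 ⟨hc.1, hc.2.1⟩),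
        if_neg (fun hc => h1 ⟨hc.1, hc.2.1⟩)]
    ring

def pvW (l : List Int) (j : Int) : Int :=
  (([j - 1, j - 2, j - 3].countP
    (fun p => decide (0 < p) && (PySem.List.pyGetD l p 1 == 0)) : Nat) : Int)

def pvKey (l : List Int) (j : Int) : Int := PySem.List.pyGetD l j 0

theorem termB_eq (l : List Int) (v : Int) (k i : ℕ) (hk : k < l.length) (hv : l[k]? = some v)
    (hi : 1 ≤ i) :
    (if (decide (0 < (k:Int) - (i:Int)) && (PySem.List.pyGetD l ((k:Int) - (i:Int)) 1 == 0))
        then (1:ℤ) else 0)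
      = (if i ≤ k then pvT l v i (k - i) else 0) := by
  by_cases hik : i < k
  · have hm1 : 1 ≤ k - i := by omega
    have hki : k - i < l.length := by omega
    have e : (k:Int) - (i:Int) = ((k - i : ℕ) : Int) := by omega
    rw [e, PySem.List.pyGetD_natCast, List.getD_eq_getElem?_getD,
        List.getElem?_eq_getElem hki]
    rw [if_pos (by omega : i ≤ k)]
    unfold pvT
    rw [show k - i + i = k from by omega, hv]
    rw [show (decide ((0:Int) < ((k - i : ℕ) : Int))) = true from by
      rw [decide_eq_true_eq]; omega, Bool.true_and]
    rw [List.getElem?_eq_getElem hki]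
    simp only [Option.getD_some]
    rcases eq_or_ne (l[k-i]'hki) 0 with hz | hz
    · rw [if_pos (by simp [hz]), if_pos ⟨hm1, by simp [hz], by trivial⟩]
    · rw [if_neg (by simp [hz]), if_neg (by
        rintro ⟨-, h2, -⟩
        exact hz (by simpa using h2))]
  · rw [show (decide (0 < (k:Int) - (i:Int))) = false from by
      rw [decide_eq_false_iff_not]; omega, Bool.false_and, if_neg (by simp)]
    by_cases hik2 : i ≤ k
    · rw [if_pos hik2]
      unfold pvT
      rw [show k - i = 0 from by omega, if_neg (by omega)]
    · rw [if_neg hik2]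

theorem bodyB_eq (l : List Int) (v : Int) (k : ℕ) (hk : k < l.length) :
    (if pvKey l (k:Int) = v then pvW l (k:Int) else 0)
      = (if 1 ≤ k then pvT l v 1 (k - 1) else 0) + (if 2 ≤ k then pvT l v 2 (k - 2) else 0)
        + (if 3 ≤ k then pvT l v 3 (k - 3) else 0) := by
  have hget : l[k]? = some (pvKey l (k:Int)) := by
    unfold pvKey
    rw [PySem.List.pyGetD_natCast, List.getD_eq_getElem?_getD, List.getElem?_eq_getElem hk]
    rfl
  by_cases hv : pvKey l (k:Int) = v
  · rw [if_pos hv]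
    rw [hv] at hget
    unfold pvW
    simp only [List.countP_cons, List.countP_nil]
    push_cast
    rw [show ((k:Int) - 1) = (k:Int) - ((1:ℕ):Int) from by norm_num,
        show ((k:Int) - 2) = (k:Int) - ((2:ℕ):Int) from by norm_num,
        show ((k:Int) - 3) = (k:Int) - ((3:ℕ):Int) from by norm_num]
    rw [termB_eq l v k 1 hk hget (by omega), termB_eq l v k 2 hk hget (by omega),
        termB_eq l v k 3 hk hget (by omega)]
    ring
  · rw [if_neg hv]
    have hvne : l[k]? ≠ some v := by rw [hget]; simpa using hv
    have hz : ∀ i : ℕ, (if i ≤ k then pvT l v i (k - i) else 0) = (0:ℤ) := by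
      intro i
      split_ifs with hik
      · unfold pvT
        split_ifs with hc
        · exact absurd (show l[k]? = some v from by
            have e : k - i + i = k := by omega
            rw [← e]; exact hc.2.2) hvne
        · rfl
      · rfl
    rw [hz 1, hz 2, hz 3]
    ring

theorem bGetD (l : List Int) (v : Int) : (pvB l).getD v 0 = pvS l v := by
  have hB : pvB l = (PySem.List.pyRange 0 (PySem.List.len l)).foldl
      (fun d j => if pvW l j ≠ 0 then d.modify (pvKey l j) 0 (· + pvW l j) else d)
      PySem.Dict.empty := rfl
  rw [hB, getD_foldl_modify_addw (pvKey l) (pvW l)]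
  rw [PySem.Dict.getD_empty, zero_add]
  rw [show PySem.List.len l = ((l.length : Nat) : Int) from rfl]
  rw [PySem.List.pyRange_zero_natCast, List.map_map]
  have bridge : ∀ F : ℕ → ℤ, ((List.range l.length).map F).sum = ∑ k ∈ Finset.range l.length, F k :=
    fun F => rfl
  rw [bridge]
  have h1 : ∀ k ∈ Finset.range l.length,
      ((fun x => if pvKey l x = v then pvW l x else 0) ∘ (fun k : ℕ => (k : Int))) k
      = (if 1 ≤ k then pvT l v 1 (k - 1) else 0) + (if 2 ≤ k then pvT l v 2 (k - 2) else 0)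
        + (if 3 ≤ k then pvT l v 3 (k - 3) else 0) := by
    intro k hk
    exact bodyB_eq l v k (Finset.mem_range.mp hk)
  rw [Finset.sum_congr rfl h1]
  rw [Finset.sum_add_distrib, Finset.sum_add_distrib]
  unfold pvS
  rw [Finset.sum_add_distrib, Finset.sum_add_distrib]
  have hsh : ∀ i : ℕ, ∑ k ∈ Finset.range l.length, (if i ≤ k then pvT l v i (k - i) else 0)
      = ∑ k ∈ Finset.range l.length, pvT l v i k := by
    intro i
    refine (sum_range_shift (pvT l v i) l.length i ?_).symm
    intro k hk
    unfold pvT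
    rw [if_neg]
    rintro ⟨-, -, h3⟩
    rw [List.getElem?_eq_none_iff.mpr (by omega)] at h3
    simp at h3
  rw [hsh 1, hsh 2, hsh 3]

theorem slice5 {α : Type} (xs : List α) : PySem.List.slice xs none (some 5) = xs.take 5 := by
  rw [show (5:ℤ) = ((5:ℕ):ℤ) from rfl, PySem.List.slice_to_natCast]

theorem pvB_fold (l : List Int) : pvB l = (PySem.List.pyRange 0 (PySem.List.len l)).foldl
    (fun d j => if pvW l j ≠ 0 then d.modify (pvKey l j) 0 (· + pvW l j) else d)
    PySem.Dict.empty := rfl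

theorem keysB (l : List Int) :
    (pvB l).keys = PySem.Set.ofList
      (((PySem.List.pyRange 0 (PySem.List.len l)).filter
        (fun j => decide (pvW l j ≠ 0))).map (pvKey l)) := by
  have h := PySem.List.foldl_ite_eq_foldl_filter (fun (j:ℤ) => pvW l j ≠ 0)
    (fun (d : PySem.Dict ℤ ℤ) j => d.modify (pvKey l j) 0 (fun x => x + pvW l j))
    (PySem.List.pyRange 0 (PySem.List.len l)) PySem.Dict.empty
  rw [pvB_fold, h]
  rw [PySem.Dict.keys_foldl_modify_key _ (pvKey l) 0 (fun _ j => (· + pvW l j))]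
  rw [PySem.Dict.keys_empty]
  rfl

theorem getD_sum (l : List Int) (v : Int) :
    (pvB l).getD v 0 = ((PySem.List.pyRange 0 (PySem.List.len l)).map
      (fun j => if pvKey l j = v then pvW l j else 0)).sum := by
  rw [pvB_fold, getD_foldl_modify_addw (pvKey l) (pvW l), PySem.Dict.getD_empty, zero_add]

theorem pvW_nonneg (l : List Int) (j : Int) : 0 ≤ pvW l j := Int.natCast_nonneg _

theorem memB_getD (l : List Int) (v : Int) :
    v ∈ (pvB l).keys ↔ (pvB l).getD v 0 ≠ 0 := by
  constructor
  · intro hv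
    rw [keysB, PySem.Set.mem_ofList, List.mem_map] at hv
    obtain ⟨j, hj, hkey⟩ := hv
    rw [List.mem_filter, decide_eq_true_eq] at hj
    obtain ⟨hjmem, hW⟩ := hj
    have hle : pvW l j ≤ ((PySem.List.pyRange 0 (PySem.List.len l)).map
        (fun j => if pvKey l j = v then pvW l j else 0)).sum := by
      apply List.single_le_sum
      · intro x hx
        rw [List.mem_map] at hx
        obtain ⟨j', _, rfl⟩ := hx
        split_ifs
        · exact pvW_nonneg l j'
        · exact le_refl 0
      · rw [List.mem_map]
        exact ⟨j, hjmem, by rw [if_pos hkey]⟩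
    rw [getD_sum]
    have hlt : 0 < pvW l j := lt_of_le_of_ne (pvW_nonneg l j) (Ne.symm hW)
    omega
  · intro hv
    by_contra hm
    rw [← PySem.Dict.contains_iff_mem_keys] at hm
    exact hv (PySem.Dict.getD_of_not_contains _ _ (by simpa using hm))

theorem memA_getD (l : List Int) (v : Int) :
    v ∈ PySem.Set.ofList (pvAz l) ↔ (pvB l).getD v 0 ≠ 0 := by
  rw [PySem.Set.mem_ofList, bGetD, ← azCount]
  rw [← List.count_pos_iff]
  omega

theorem az_subset (l : List Int) (v : Int) (hv : v ∈ pvAz l) : v ∈ l := by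
  rw [pvAz_eq, List.mem_flatMap] at hv
  obtain ⟨k, -, hk2⟩ := hv
  exact List.mem_of_mem_drop (List.mem_of_mem_take hk2)

-- ===== VERDICT (by name: the statement is the Claim_ definition above) =====
theorem analyze_zero_behavior_spec : Claim_equal_analyze_zero_behavior := by
  intro l hdom
  unfold Spec_analyze_zero_behavior
  have hbound : ∀ v ∈ l, -2147483648 ≤ v ∧ v ≤ 2147483648 := by
    intro v hv
    unfold Dom_analyze_zero_behavior at hdom
    rw [List.all_eq_true] at hdom
    have := hdom v hv
    unfold pvDomInt at this
    rw [decide_eq_true_eq] at this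
    omega
  set KB : Int → Int := fun v => -((pvB l).getD v 0) * 17179869184 + v with hKB
  set ksA : List Int := PySem.Set.ofList (pvAz l) with hksA
  set S : List Int := PySem.List.sorted ksA KB with hS
  have hAbound : ∀ v ∈ ksA, -2147483648 ≤ v ∧ v ≤ 2147483648 := by
    intro v hv
    exact hbound v (az_subset l v ((PySem.Set.mem_ofList _ _).1 hv))
  have hBbound : ∀ v ∈ (pvB l).keys, -2147483648 ≤ v ∧ v ≤ 2147483648 := by
    intro v hv
    exact hbound v (az_subset l v ((PySem.Set.mem_ofList _ _).1
      ((memA_getD l v).2 ((memB_getD l v).1 hv))))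
  have hSperm : S.Perm ksA := PySem.List.sorted_perm _ _ _
  have hSmem : ∀ v ∈ S, -2147483648 ≤ v ∧ v ≤ 2147483648 := by
    intro v hv
    exact hAbound v (hSperm.mem_iff.1 hv)
  have hSnodup : S.Nodup := hSperm.nodup_iff.2 (PySem.Set.nodup_ofList _)
  have hSpair : S.Pairwise (fun a b => KB a < KB b) := by
    have h1 : S.Pairwise (fun a b => KB a ≤ KB b) := PySem.List.sorted_pairwise _ _
    refine (h1.and hSnodup).imp_of_mem ?_
    intro a b ha hb hab
    rcases hab with ⟨hle, hne⟩
    rcases lt_or_eq_of_le hle with h | h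
    · exact h
    · exfalso
      apply hne
      have ba := hSmem a ha
      have bb := hSmem b hb
      rw [hKB] at h
      simp only at h
      omega
  have hpermAB : ksA.Perm (pvB l).keys := by
    rw [List.perm_ext_iff_of_nodup (PySem.Set.nodup_ofList _)
      (by rw [keysB]; exact PySem.Set.nodup_ofList _)]
    intro v
    exact (memA_getD l v).trans (memB_getD l v).symm
  -- A's side
  have hA : analyze_zero_behavior l
      = (PySem.List.slice (PySem.List.sorted2 (PySem.Dict.counter (pvAz l)).items
          (fun x => -x.2) (fun x => x.1)) none (some 5)).map (fun p => p.1) := rfl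
  have hf : ∀ x ∈ ksA.map (fun k => (k, ((pvAz l).count k : Int))),
      -2147483648 ≤ x.1 ∧ x.1 ≤ 2147483648 := by
    intro x hx
    rw [List.mem_map] at hx
    obtain ⟨k, hk, rfl⟩ := hx
    exact hAbound k hk
  have hAeq : analyze_zero_behavior l = S.take 5 := by
    rw [hA, PySem.Dict.items_counter, ← hksA]
    rw [sorted2_eq_sorted _ _ _ hf]
    have hKAf : ∀ k : Int, (fun x : Int × Int => -x.2 * 17179869184 + x.1)
        ((fun k => (k, ((pvAz l).count k : Int))) k) = KB k := by
      intro k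
      simp only [hKB]
      rw [azCount, bGetD]
    rw [PySem.List.sorted_eq_of_perm_of_pairwise_lt
      (ksA.map (fun k => (k, ((pvAz l).count k : Int))))
      (S.map (fun k => (k, ((pvAz l).count k : Int))))
      (fun x => -x.2 * 17179869184 + x.1)
      (hSperm.map _)
      (by
        rw [List.pairwise_map]
        refine hSpair.imp_of_mem ?_
        intro a b _ _ hab
        rw [hKAf a, hKAf b]
        exact hab)]
    rw [slice5, ← List.map_take, List.map_map]
    rw [show ((fun p : ℤ × ℤ => p.1) ∘ fun k => (k, ((pvAz l).count k : ℤ))) = fun k : ℤ => k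
      from rfl, List.map_id']
  -- B's side
  have hBdef : analyze_zero_behavior_alt l
      = PySem.List.slice (PySem.List.sorted2 (pvB l).keys
          (fun v => -((pvB l).getD v 0)) (fun v => v)) none (some 5) := rfl
  have hBeq : analyze_zero_behavior_alt l = S.take 5 := by
    rw [hBdef, sorted2_eq_sorted _ _ _ (by
      intro a ha
      exact hBbound a ha)]
    rw [PySem.List.sorted_eq_of_perm_of_pairwise_lt (pvB l).keys S
      (fun a => -((pvB l).getD a 0) * 17179869184 + a)
      (hSperm.trans hpermAB) hSpair]
    rw [slice5]
  rw [hAeq, hBeq]
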